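-- pv_equiv track=rewrite | github.com/TheColby/intervalEncyclopedia | generate-master-encyclopedia.py | split_url_suffix
-- ===== SOURCE A (Python) =====
-- URL_TRAILING_PUNCTUATION = ".,;:!?)]}"
--
-- def split_url_suffix(url: str) -> tuple[str, str]:
--     trimmed = url.rstrip(URL_TRAILING_PUNCTUATION)
--     if not trimmed:
--         return url, ""
--
--     # Keep balanced parentheses when URL path legitimately ends with ')'.
--     suffix = url[len(trimmed) :]
--     while suffix.startswith(")") and trimmed.count("(") > trimmed.count(")"):
--         trimmed += ")"
--         suffix = suffix[1:]
--     return trimmed, suffix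
-- ===== SOURCE B (Python) =====
-- URL_TRAILING_PUNCTUATION = ".,;:!?)]}"
--
-- def split_url_suffix(url: str) -> tuple[str, str]:
--     trimmed = url.rstrip(URL_TRAILING_PUNCTUATION)
--     if not trimmed:
--         return url, ""
--     suffix = url[len(trimmed):]
--     # Closed form instead of the re-counting while loop: restore at most
--     # min(leading ')'-run of suffix, unmatched '(' surplus of trimmed) parens.
--     balance = trimmed.count("(") - trimmed.count(")")
--     run = len(suffix) - len(suffix.lstrip(")"))
--     n = min(run, balance) if balance > 0 else 0
--     return trimmed + ")" * n, suffix[n:]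
-- ===== Notes on version B (the rewrite author's own statement) =====
-- stated objective: simpler
-- what changed: The per-iteration recount-and-append while loop is replaced by one closed-form computation: n = min(leading close-paren run of the suffix, open-paren surplus of trimmed), then a single concatenation and slice.
import Mathlib
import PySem

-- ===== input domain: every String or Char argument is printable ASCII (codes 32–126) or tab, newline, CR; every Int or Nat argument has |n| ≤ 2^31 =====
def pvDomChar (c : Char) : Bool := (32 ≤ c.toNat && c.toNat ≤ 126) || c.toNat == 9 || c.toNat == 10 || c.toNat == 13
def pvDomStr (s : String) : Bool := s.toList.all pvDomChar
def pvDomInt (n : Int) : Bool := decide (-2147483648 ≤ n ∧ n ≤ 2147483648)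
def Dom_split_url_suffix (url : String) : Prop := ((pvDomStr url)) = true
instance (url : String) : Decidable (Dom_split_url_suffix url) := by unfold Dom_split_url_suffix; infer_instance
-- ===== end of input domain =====

-- B replaces A's recount-and-append while loop by one closed-form min computation (objective: simpler).

-- ===== PORT A =====
-- url.rstrip(".,;:!?)]}") — hand port of rstrip-with-chars (PySem has only whitespace rstrip);
-- exact: drops exactly the trailing characters belonging to the set.
def pvPunct : List Char := ".,;:!?)]}".toList

def pvRstripPunct (cs : List Char) : List Char :=
  (cs.reverse.dropWhile (fun c => pvPunct.contains c)).reverse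

-- the while loop of A; trimmed.count("(") for a single-char substring is List.count (exact)
def pvLoopA : List Char → List Char → List Char × List Char
  | trimmed, ')' :: rest =>
      if trimmed.count '(' > trimmed.count ')' then pvLoopA (trimmed ++ [')']) rest
      else (trimmed, ')' :: rest)
  | trimmed, suffix => (trimmed, suffix)

def split_url_suffix (url : String) : String × String :=
  let cs := url.toList
  let trimmed := pvRstripPunct cs
  if trimmed = [] then (url, "")
  else
    -- url[len(trimmed):] with 0 ≤ len(trimmed) ≤ len(url): drop is exact
    let suffix := cs.drop trimmed.length
    let r := pvLoopA trimmed suffix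
    (String.ofList r.1, String.ofList r.2)

-- ===== PORT B =====
def split_url_suffix_alt (url : String) : String × String :=
  let cs := url.toList
  let trimmed := (cs.reverse.dropWhile (fun c => pvPunct.contains c)).reverse
  if trimmed = [] then (url, "")
  else
    let suffix := cs.drop trimmed.length
    let balance : Int := (trimmed.count '(' : Int) - (trimmed.count ')' : Int)
    -- suffix.lstrip(")") is dropWhile (· == ')'); exact
    let run : Nat := suffix.length - (suffix.dropWhile (· == ')')).length
    let n : Nat := if 0 < balance then min run balance.toNat else 0
    (String.ofList (trimmed ++ List.replicate n ')'), String.ofList (suffix.drop n))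

-- ===== PRECONDITION & SPEC =====
def Spec_split_url_suffix (url : String) (out : String × String) : Prop := out = split_url_suffix_alt url
instance (url : String) (out : String × String) : Decidable (Spec_split_url_suffix url out) := by unfold Spec_split_url_suffix; infer_instance

-- ===== CLAIM (what is proved, stated in full; the proofs are below) =====
def Claim_equal_split_url_suffix : Prop := ∀ (url : String), Dom_split_url_suffix url → Spec_split_url_suffix url (split_url_suffix url)

-- ===== LEMMAS AND PROOFS =====

-- A's loop computes the closed form: append min(run, max(balance,0)) close parens.
theorem pvLoopA_closed (suffix : List Char) : ∀ (trimmed : List Char),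
    pvLoopA trimmed suffix =
      (trimmed ++ List.replicate
          (if 0 < (trimmed.count '(' : Int) - (trimmed.count ')' : Int)
           then min (suffix.takeWhile (· == ')')).length
                    ((trimmed.count '(' : Int) - (trimmed.count ')' : Int)).toNat
           else 0) ')',
       suffix.drop
          (if 0 < (trimmed.count '(' : Int) - (trimmed.count ')' : Int)
           then min (suffix.takeWhile (· == ')')).length
                    ((trimmed.count '(' : Int) - (trimmed.count ')' : Int)).toNat
           else 0)) := by
  induction suffix with
  | nil =>
      intro trimmed
      simp [pvLoopA]
  | cons c rest ih =>
      intro trimmed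
      by_cases hc : c = ')'
      · subst hc
        by_cases hb : trimmed.count '(' > trimmed.count ')'
        · have hb' : 0 < (trimmed.count '(' : Int) - (trimmed.count ')' : Int) := by
            omega
          rw [show pvLoopA trimmed (')' :: rest) = pvLoopA (trimmed ++ [')']) rest from by
                simp [pvLoopA, hb]]
          rw [ih (trimmed ++ [')'])]
          have hcnt1 : (trimmed ++ [')']).count '(' = trimmed.count '(' := by
            simp [List.count_append]
          have hcnt2 : (trimmed ++ [')']).count ')' = trimmed.count ')' + 1 := by
            simp [List.count_append]
          rw [hcnt1, hcnt2]
          have hrun : ((')' :: rest).takeWhile (· == ')')) = ')' :: rest.takeWhile (· == ')') := by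
            simp
          rw [hrun, if_pos hb']
          by_cases hb2 : 0 < (trimmed.count '(' : Int) - ((trimmed.count ')' + 1 : Nat) : Int)
          · rw [if_pos hb2]
            have hn : min (')' :: rest.takeWhile (· == ')')).length
                ((trimmed.count '(' : Int) - (trimmed.count ')' : Int)).toNat
                = min (rest.takeWhile (· == ')')).length
                    ((trimmed.count '(' : Int) - ((trimmed.count ')' + 1 : Nat) : Int)).toNat + 1 := by
              simp only [List.length_cons]
              push_cast at hb2 ⊢
              omega
            rw [hn, List.replicate_succ, List.drop_succ_cons]
            simp [List.append_assoc]
          · rw [if_neg hb2]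
            have hn : min (')' :: rest.takeWhile (· == ')')).length
                ((trimmed.count '(' : Int) - (trimmed.count ')' : Int)).toNat = 1 := by
              simp only [List.length_cons]
              push_cast at hb2
              omega
            rw [hn]
            simp
        · have hb' : ¬ 0 < (trimmed.count '(' : Int) - (trimmed.count ')' : Int) := by
            omega
          rw [show pvLoopA trimmed (')' :: rest) = (trimmed, ')' :: rest) from by
                simp [pvLoopA, hb]]
          rw [if_neg hb']
          simp
      · -- head is not ')': loop stops, run = 0
        have hstop : pvLoopA trimmed (c :: rest) = (trimmed, c :: rest) := by
          unfold pvLoopA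
          split <;> simp_all
        rw [hstop]
        have hrun : ((c :: rest).takeWhile (· == ')')).length = 0 := by
          simp [hc]
        rw [hrun]
        simp

theorem length_sub_dropWhile (p : Char → Bool) (l : List Char) :
    l.length - (l.dropWhile p).length = (l.takeWhile p).length := by
  have h : (l.takeWhile p).length + (l.dropWhile p).length = l.length := by
    rw [← List.length_append, List.takeWhile_append_dropWhile]
  omega

-- ===== VERDICT (by name: the statement is the Claim_ definition above) =====
theorem split_url_suffix_spec : Claim_equal_split_url_suffix := by
  intro url _
  unfold Spec_split_url_suffix split_url_suffix split_url_suffix_alt pvRstripPunct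
  simp only
  split
  · rfl
  · rw [pvLoopA_closed, length_sub_dropWhile]
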